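-- pv_equiv track=rewrite | github.com/Maelstrom6/mandelpy | program_examples/trial.py | f
-- ===== SOURCE A (Python) =====
-- def f(n: int, poly: list = [0, 1]):
--     if n == 1:
--         return poly
--     else:
--
--         def c(m):
--             tot = 0
--             for i in range(max(0, m - len(poly) + 1), min(m + 1, len(poly))):
--                 tot += poly[i] * poly[m - i]
--             return tot
--
--         new_len = 2 * len(poly) - 1
--         new_poly = [0] * new_len
--         for i in range(new_len):
--             new_poly[i] = c(i)  # square
--         new_poly[1] = 1  # add c
--
--         return f(n - 1, new_poly)
-- ===== SOURCE B (Python) =====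
-- def f(n: int, poly: list = [0, 1]):
--     p = list(poly)
--     for _ in range(n - 1):
--         sq = [0] * (2 * len(p) - 1)
--         for i, a in enumerate(p):
--             for j, b in enumerate(p):
--                 sq[i + j] += a * b
--         sq[1] = 1  # add c
--         p = sq
--     return p
-- ===== Notes on version B (the rewrite author's own statement) =====
-- stated objective: simpler
-- what changed: A's recursion with a per-output-coefficient convolution helper c(m) (index-range gymnastics per coefficient) is replaced by an iterative loop that squares the polynomial by accumulating all pairwise coefficient products sq[i+j] += a*b in one nested pass.
import Mathlib
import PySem

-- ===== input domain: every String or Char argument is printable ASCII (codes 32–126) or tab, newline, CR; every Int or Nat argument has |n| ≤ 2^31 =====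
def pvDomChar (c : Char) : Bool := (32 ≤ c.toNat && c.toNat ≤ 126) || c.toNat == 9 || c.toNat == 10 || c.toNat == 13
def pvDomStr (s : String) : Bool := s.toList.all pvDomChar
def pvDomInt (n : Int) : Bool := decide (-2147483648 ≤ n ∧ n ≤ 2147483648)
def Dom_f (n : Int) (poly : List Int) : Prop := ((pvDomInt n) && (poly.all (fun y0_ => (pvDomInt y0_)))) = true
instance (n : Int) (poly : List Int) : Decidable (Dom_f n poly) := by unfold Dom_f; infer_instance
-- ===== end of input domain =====

-- B replaces A's recursion + per-output-coefficient convolution helper with an iterative loop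
-- that accumulates the pairwise products of the coefficients; return values proved equal on Pre_f.

-- ===== PORT A =====
-- A's inner helper c(m): tot += poly[i] * poly[m - i] over the trimmed range
def fC (poly : List Int) (m : Int) : Int :=
  (PySem.List.pyRange (max 0 (m - (poly.length : Int) + 1)) (min (m + 1) (poly.length : Int)) 1).foldl
    (fun tot i => tot + PySem.List.pyGetD poly i 0 * PySem.List.pyGetD poly (m - i) 0) 0

-- guard `n ≤ 1` (Python tests `n == 1`): for n < 1 the Python never returns (outside Pre_f), the
-- guard only makes the same recursion total.  `new_poly[1] = 1` is ported with the total pySetD;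
-- it is in range on every input admitted by Pre_f.
def f (n : Int) (poly : List Int) : List Int :=
  if _h : n ≤ 1 then poly
  else
    let newLen : Int := 2 * (poly.length : Int) - 1
    let newPoly := (PySem.List.pyRange 0 newLen 1).map (fun i => fC poly i)  -- for i in range(new_len): new_poly[i] = c(i)
    f (n - 1) (PySem.List.pySetD newPoly 1 1)  -- new_poly[1] = 1  # add c
termination_by n.toNat
decreasing_by omega

-- ===== PORT B =====
-- one pass of the loop body of Source B: square p by accumulating sq[i+j] += a*b, then sq[1] = 1.
-- sq[i+j] += a*b is always in range; sq[1] = 1 is in range on Pre_f (total pySetD, as in port A).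
def sqStep (p : List Int) : List Int :=
  let sq0 : List Int := List.replicate (2 * p.length - 1) 0  -- [0] * (2*len(p)-1); Nat sub matches Python ([0]*(-1) = [])
  let sq := (PySem.List.enumerate p 0).foldl (fun sq ia =>
      (PySem.List.enumerate p 0).foldl (fun s jb =>
        PySem.List.pySetD s (ia.1 + jb.1) (PySem.List.pyGetD s (ia.1 + jb.1) 0 + ia.2 * jb.2)) sq) sq0
  PySem.List.pySetD sq 1 1

-- `p = list(poly); for _ in range(n - 1): p = <loop body>` = iterate the body (n-1).toNat times
def f_alt (n : Int) (poly : List Int) : List Int := sqStep^[(n - 1).toNat] poly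

-- ===== PRECONDITION & SPEC =====
-- Exactly the inputs on which Python A returns: n = 1 returns poly as is; for n ≥ 2 a step needs
-- len(poly) ≥ 2 (else new_poly[1] = 1 raises IndexError); for n ≤ 0 the recursion never returns.
def Pre_f (n : Int) (poly : List Int) : Prop := n = 1 ∨ (2 ≤ n ∧ 2 ≤ poly.length)
instance (n : Int) (poly : List Int) : Decidable (Pre_f n poly) := by unfold Pre_f; infer_instance
def pvWitness_f : Int × List Int := (3, [0, 1])

def Spec_f (n : Int) (poly : List Int) (out : List Int) : Prop := out = f_alt n poly
instance (n : Int) (poly : List Int) (out : List Int) : Decidable (Spec_f n poly out) := by unfold Spec_f; infer_instance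

-- ===== CLAIM (what is proved, stated in full; the proofs are below) =====
def Claim_equal_f : Prop := ∀ (n : Int) (poly : List Int), Dom_f n poly → Pre_f n poly → Spec_f n poly (f n poly)

-- ===== LEMMAS AND PROOFS =====

theorem sum_map_range (n : Nat) (h : Nat → Int) :
    ((List.range n).map h).sum = ∑ i ∈ Finset.range n, h i := by
  induction n with
  | zero => simp
  | succ m ih => simp [List.range_succ, Finset.sum_range_succ, ih]

-- the common middle form: coefficient k of the square of p
def convM (p : List Int) (k : Nat) : Int :=
  ∑ j ∈ Finset.Ico (k + 1 - p.length) (min (k + 1) p.length), p.getD j 0 * p.getD (k - j) 0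

-- ---- A side: fC computes convM ----
theorem fC_eq_convM (p : List Int) (k : Nat) : fC p (k : Int) = convM p k := by
  have hlo : max 0 ((k : Int) - (p.length : Int) + 1) = ((k + 1 - p.length : Nat) : Int) := by omega
  have hhi : min ((k : Int) + 1) ((p.length : Int)) = ((min (k + 1) p.length : Nat) : Int) := by omega
  rw [fC, hlo, hhi, PySem.List.pyRange_one, List.foldl_map, PySem.List.foldl_add, zero_add,
      sum_map_range]
  have hcnt : ((((min (k + 1) p.length : Nat) : Int)) - ((k + 1 - p.length : Nat) : Int)).toNat
      = min (k + 1) p.length - (k + 1 - p.length) := by omega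
  rw [hcnt, convM, Finset.sum_Ico_eq_sum_range]
  apply Finset.sum_congr rfl
  intro t ht
  simp only [Finset.mem_range] at ht
  have h1 : ((k + 1 - p.length : Nat) : Int) + (t : Int) = ((k + 1 - p.length + t : Nat) : Int) := by
    omega
  have h2 : (k : Int) - ((k + 1 - p.length + t : Nat) : Int)
      = ((k - (k + 1 - p.length + t) : Nat) : Int) := by omega
  simp only [h1, h2, PySem.List.pyGetD_natCast]

-- ---- B side: characterise the nested accumulation folds ----
theorem inner_fold (q : List Int) : ∀ (j0 : Nat) (sq : List Int) (i : Nat) (a : Int),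
    i + j0 + q.length ≤ sq.length →
    ((q.zipIdx j0).foldl (fun s bj => s.set (i + bj.2) (s.getD (i + bj.2) 0 + a * bj.1)) sq).length
        = sq.length ∧
    ∀ k : Nat,
      ((q.zipIdx j0).foldl (fun s bj => s.set (i + bj.2) (s.getD (i + bj.2) 0 + a * bj.1)) sq).getD k 0
        = sq.getD k 0 +
          (if i + j0 ≤ k ∧ k < i + j0 + q.length then a * q.getD (k - (i + j0)) 0 else 0) := by
  induction q with
  | nil => intro j0 sq i a h; refine ⟨rfl, ?_⟩; intro k; simp
  | cons b q' ih =>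
    intro j0 sq i a h
    rw [List.zipIdx_cons, List.foldl_cons]
    have hwrite : i + j0 < sq.length := by simp only [List.length_cons] at h; omega
    set sq' := sq.set (i + j0) (sq.getD (i + j0) 0 + a * b) with hsq'
    have hlen' : sq'.length = sq.length := List.length_set
    have h' : i + (j0 + 1) + q'.length ≤ sq'.length := by
      rw [hlen']; simp only [List.length_cons] at h; omega
    obtain ⟨hl, hg⟩ := ih (j0 + 1) sq' i a h'
    refine ⟨by rw [hl, hlen'], ?_⟩
    intro k
    rw [hg k]
    have hsqk : sq'.getD k 0
        = if i + j0 = k then sq.getD (i + j0) 0 + a * b else sq.getD k 0 := by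
      by_cases hk : i + j0 = k
      · rw [if_pos hk, hsq', List.getD_eq_getElem?_getD, List.getElem?_set, if_pos hk,
            if_pos hwrite, Option.getD_some]
      · rw [if_neg hk, hsq', List.getD_eq_getElem?_getD, List.getElem?_set, if_neg hk,
            ← List.getD_eq_getElem?_getD]
    rw [hsqk]
    by_cases hk : i + j0 = k
    · subst hk
      have c1 : ¬ (i + (j0 + 1) ≤ i + j0 ∧ i + j0 < i + (j0 + 1) + q'.length) := by omega
      have c2 : i + j0 ≤ i + j0 ∧ i + j0 < i + j0 + (b :: q').length := by
        simp only [List.length_cons]; omega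
      rw [if_neg c1, if_pos c2, Nat.sub_self, List.getD_cons_zero]
      simp
    · rw [if_neg hk]
      by_cases hc : i + (j0 + 1) ≤ k ∧ k < i + (j0 + 1) + q'.length
      · have hc2 : i + j0 ≤ k ∧ k < i + j0 + (b :: q').length := by
          simp only [List.length_cons]; omega
        rw [if_pos hc, if_pos hc2]
        have he : k - (i + j0) = (k - (i + (j0 + 1))) + 1 := by omega
        rw [he, List.getD_cons_succ]
      · have hc2 : ¬ (i + j0 ≤ k ∧ k < i + j0 + (b :: q').length) := by
          simp only [List.length_cons]; omega
        rw [if_neg hc, if_neg hc2]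

theorem outer_fold (p : List Int) (q : List Int) : ∀ (i0 : Nat) (sq : List Int),
    i0 + q.length + p.length ≤ sq.length + 1 →
    ((q.zipIdx i0).foldl (fun sq ia => (p.zipIdx 0).foldl
        (fun s bj => s.set (ia.2 + bj.2) (s.getD (ia.2 + bj.2) 0 + ia.1 * bj.1)) sq) sq).length
      = sq.length ∧
    ∀ k : Nat,
      ((q.zipIdx i0).foldl (fun sq ia => (p.zipIdx 0).foldl
          (fun s bj => s.set (ia.2 + bj.2) (s.getD (ia.2 + bj.2) 0 + ia.1 * bj.1)) sq) sq).getD k 0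
        = sq.getD k 0 + ∑ j ∈ Finset.range q.length,
            (if i0 + j ≤ k ∧ k < i0 + j + p.length
             then q.getD j 0 * p.getD (k - (i0 + j)) 0 else 0) := by
  induction q with
  | nil => intro i0 sq h; refine ⟨rfl, ?_⟩; intro k; simp
  | cons a q' ih =>
    intro i0 sq h
    rw [List.zipIdx_cons, List.foldl_cons]
    have hin : i0 + 0 + p.length ≤ sq.length := by simp only [List.length_cons] at h; omega
    obtain ⟨hl1, hg1⟩ := inner_fold p 0 sq i0 a hin
    set sq' := (p.zipIdx 0).foldl
        (fun s bj => s.set (i0 + bj.2) (s.getD (i0 + bj.2) 0 + a * bj.1)) sq with hsq'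
    have h' : (i0 + 1) + q'.length + p.length ≤ sq'.length + 1 := by
      rw [hl1]; simp only [List.length_cons] at h; omega
    obtain ⟨hl, hg⟩ := ih (i0 + 1) sq' h'
    refine ⟨by rw [hl, hl1], ?_⟩
    intro k
    rw [hg k, hg1 k]
    rw [List.length_cons, Finset.sum_range_succ']
    have hsum : ∀ j ∈ Finset.range q'.length,
        (if (i0 + 1) + j ≤ k ∧ k < (i0 + 1) + j + p.length
         then q'.getD j 0 * p.getD (k - ((i0 + 1) + j)) 0 else 0)
        = (if i0 + (j + 1) ≤ k ∧ k < i0 + (j + 1) + p.length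
           then (a :: q').getD (j + 1) 0 * p.getD (k - (i0 + (j + 1))) 0 else 0) := by
      intro j _
      have he : i0 + (j + 1) = (i0 + 1) + j := by omega
      rw [he, List.getD_cons_succ]
    rw [Finset.sum_congr rfl hsum]
    simp only [Nat.add_zero, List.getD_cons_zero]
    ring

def outerFold (p : List Int) : List Int :=
  p.zipIdx.foldl (fun sq ia => p.zipIdx.foldl
      (fun s bj => s.set (ia.2 + bj.2) (s.getD (ia.2 + bj.2) 0 + ia.1 * bj.1)) sq)
    (List.replicate (2 * p.length - 1) 0)

theorem sum_ite_eq_convM (p : List Int) (k : Nat) :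
    (∑ j ∈ Finset.range p.length,
      (if j ≤ k ∧ k < j + p.length then p.getD j 0 * p.getD (k - j) 0 else 0)) = convM p k := by
  rw [convM]
  have hsub : Finset.Ico (k + 1 - p.length) (min (k + 1) p.length) ⊆ Finset.range p.length := by
    intro j hj
    simp only [Finset.mem_Ico] at hj
    simp only [Finset.mem_range]
    omega
  rw [← Finset.sum_subset hsub]
  · apply Finset.sum_congr rfl
    intro j hj
    simp only [Finset.mem_Ico] at hj
    rw [if_pos (by omega)]
  · intro j hj hnot
    simp only [Finset.mem_range] at hj
    simp only [Finset.mem_Ico, not_and, not_lt] at hnot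
    have hz : ¬ (j ≤ k ∧ k < j + p.length) := by
      by_cases hlo : k + 1 - p.length ≤ j
      · have := hnot hlo; omega
      · omega
    rw [if_neg hz]

theorem outerFold_spec (p : List Int) :
    (outerFold p).length = 2 * p.length - 1 ∧ ∀ k : Nat, (outerFold p).getD k 0 = convM p k := by
  obtain ⟨hl, hg⟩ := outer_fold p p 0 (List.replicate (2 * p.length - 1) 0)
    (by simp only [List.length_replicate]; omega)
  refine ⟨by rw [outerFold, hl, List.length_replicate], ?_⟩
  intro k
  have hrep : (List.replicate (2 * p.length - 1) (0 : Int)).getD k 0 = 0 := by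
    rcases Nat.lt_or_ge k (2 * p.length - 1) with h | h
    · exact List.getD_replicate _ h
    · exact List.getD_eq_default _ _ (by simpa using h)
  rw [outerFold]
  rw [hg k, hrep, zero_add]
  simpa using sum_ite_eq_convM p k

-- sqStep, with enumerate/pySetD/pyGetD reduced to zipIdx/set/getD
theorem sqStep_eq (p : List Int) : sqStep p = (outerFold p).set 1 1 := by
  rw [sqStep, outerFold]
  rw [show (1 : Int) = ((1 : Nat) : Int) from rfl, PySem.List.pySetD_natCast]
  congr 1
  simp only [PySem.List.enumerate_eq_zipIdx_map, List.foldl_map, zero_add, ← Nat.cast_add,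
    PySem.List.pySetD_natCast, PySem.List.pyGetD_natCast]

-- the A-side new_poly (before new_poly[1] = 1) is the same list
theorem outer_eq_mapA (p : List Int) :
    outerFold p = (PySem.List.pyRange 0 (2 * (p.length : Int) - 1) 1).map (fun i => fC p i) := by
  obtain ⟨hl, hg⟩ := outerFold_spec p
  have hlen : (outerFold p).length
      = ((PySem.List.pyRange 0 (2 * (p.length : Int) - 1) 1).map (fun i => fC p i)).length := by
    rw [hl, List.length_map, PySem.List.length_pyRange_one]; omega
  apply List.ext_getElem hlen
  intro k h1 h2
  rw [List.getElem_map, PySem.List.getElem_pyRange_one, zero_add, fC_eq_convM]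
  rw [← hg k, List.getD_eq_getElem]

-- one unfolding of A's recursion equals one sqStep
theorem step_eq (p : List Int) :
    PySem.List.pySetD
      ((PySem.List.pyRange 0 (2 * (p.length : Int) - 1) 1).map (fun i => fC p i)) 1 1 = sqStep p := by
  rw [sqStep_eq, ← outer_eq_mapA, show (1 : Int) = ((1 : Nat) : Int) from rfl,
      PySem.List.pySetD_natCast]

theorem f_eq_iter : ∀ (m : Nat) (n : Int) (p : List Int), (n - 1).toNat = m →
    f n p = sqStep^[m] p := by
  intro m
  induction m with
  | zero =>
    intro n p h
    have hn : n ≤ 1 := by omega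
    rw [f, dif_pos hn, Function.iterate_zero_apply]
  | succ m ih =>
    intro n p h
    have hn : ¬ n ≤ 1 := by omega
    rw [f, dif_neg hn]
    simp only []
    rw [step_eq, ih (n - 1) (sqStep p) (by omega), ← Function.iterate_succ_apply]

-- ===== VERDICT (by name: the statement is the Claim_ definition above) =====
theorem f_spec : Claim_equal_f := by
  intro n poly _ _
  show f n poly = f_alt n poly
  rw [f_alt]
  exact f_eq_iter ((n - 1).toNat) n poly rfl
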